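-- pv_equiv track=rewrite | github.com/AndreSlavescu/SCI206-Project | cannon_ball/learning_quotes.py | get_value_trend
-- ===== SOURCE A (Python) =====
-- def get_value_trend(current, history):
--     if len(history) < 2:
--         return 'stable'
--     if all(x < y for x, y in zip(history, history[1:])):
--         return 'increasing'
--     if all(x > y for x, y in zip(history, history[1:])):
--         return 'decreasing'
--     return 'experimenting'
-- ===== SOURCE B (Python) =====
-- def get_value_trend(current, history):
--     if len(history) < 2:
--         return 'stable'
--     canon = sorted(set(history))
--     if history == canon:
--         return 'increasing'
--     if history == list(reversed(canon)):
--         return 'decreasing'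
--     return 'experimenting'
-- ===== Notes on version B (the rewrite author's own statement) =====
-- stated objective: alternative
-- what changed: Instead of scanning adjacent pairs twice with short-circuiting all() comparisons, B builds the canonical strictly-sorted deduplicated form sorted(set(history)) once and decides the trend by whole-list equality with it and with its reverse.
import Mathlib
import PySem

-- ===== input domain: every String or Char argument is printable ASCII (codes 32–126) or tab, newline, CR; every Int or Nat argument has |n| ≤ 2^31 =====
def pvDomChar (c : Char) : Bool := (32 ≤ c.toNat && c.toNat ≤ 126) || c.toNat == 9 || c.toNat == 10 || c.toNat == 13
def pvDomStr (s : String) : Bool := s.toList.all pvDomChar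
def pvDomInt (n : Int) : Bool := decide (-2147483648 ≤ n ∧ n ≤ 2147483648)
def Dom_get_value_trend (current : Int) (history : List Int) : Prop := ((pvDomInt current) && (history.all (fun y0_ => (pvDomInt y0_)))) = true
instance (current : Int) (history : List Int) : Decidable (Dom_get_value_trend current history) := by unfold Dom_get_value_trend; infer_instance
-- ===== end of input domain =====

-- B replaces A's two adjacent-pair all() scans by building the canonical form sorted(set(history)) once and comparing the whole list with it and its reverse (alternative algorithm, not claimed faster).
-- ===== PORT A =====
def get_value_trend (current : Int) (history : List Int) : String :=
  if history.length < 2 then "stable"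
  else if (history.zip (history.drop 1)).all (fun p => decide (p.1 < p.2)) then "increasing"
  else if (history.zip (history.drop 1)).all (fun p => decide (p.1 > p.2)) then "decreasing"
  else "experimenting"

-- ===== PORT B =====
def get_value_trend_alt (current : Int) (history : List Int) : String :=
  if history.length < 2 then "stable"
  else
    let canon := PySem.List.sorted (PySem.Set.ofList history) (fun x => x) false
    if history = canon then "increasing"
    else if history = canon.reverse then "decreasing"
    else "experimenting"

-- ===== PRECONDITION & SPEC =====
def Spec_get_value_trend (current : Int) (history : List Int) (out : String) : Prop := out = get_value_trend_alt current history
instance (current : Int) (history : List Int) (out : String) : Decidable (Spec_get_value_trend current history out) := by unfold Spec_get_value_trend; infer_instance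

-- ===== CLAIM (what is proved, stated in full; the proofs are below) =====
def Claim_equal_get_value_trend : Prop := ∀ (current : Int) (history : List Int), Dom_get_value_trend current history → Spec_get_value_trend current history (get_value_trend current history)

-- ===== LEMMAS AND PROOFS =====

-- A's adjacent-pair all() scan is exactly Pairwise of the comparison (strict orders are transitive).
theorem adj_all_lt (xs : List Int) :
    ((xs.zip (xs.drop 1)).all (fun p => decide (p.1 < p.2)) = true) ↔ xs.Pairwise (· < ·) := by
  rw [← List.isChain_iff_pairwise]
  induction xs with
  | nil => simp
  | cons a t ih =>
    cases t with
    | nil => simp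
    | cons b u =>
      simp only [List.drop_succ_cons, List.drop_zero, List.zip_cons_cons, List.all_cons,
        Bool.and_eq_true, decide_eq_true_eq] at *
      rw [List.isChain_cons_cons, and_congr_right_iff]
      intro _; exact ih

theorem adj_all_gt (xs : List Int) :
    ((xs.zip (xs.drop 1)).all (fun p => decide (p.1 > p.2)) = true) ↔ xs.Pairwise (· > ·) := by
  rw [← List.isChain_iff_pairwise]
  induction xs with
  | nil => simp
  | cons a t ih =>
    cases t with
    | nil => simp
    | cons b u =>
      simp only [List.drop_succ_cons, List.drop_zero, List.zip_cons_cons, List.all_cons,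
        Bool.and_eq_true, decide_eq_true_eq] at *
      rw [List.isChain_cons_cons, and_congr_right_iff]
      intro _; exact ih

theorem pairwise_lt_iff_canon (xs : List Int) :
    xs.Pairwise (· < ·) ↔ xs = PySem.List.sorted (PySem.Set.ofList xs) (fun x => x) false := by
  constructor
  · intro h
    have hnd : xs.Nodup := h.imp ne_of_lt
    rw [PySem.Set.ofList_eq_self_of_nodup xs hnd]
    exact (PySem.List.sorted_eq_of_perm_of_pairwise_lt xs xs (fun x => x) (List.Perm.refl xs) h).symm
  · intro h
    rw [h]
    exact PySem.List.sorted_ofList_pairwise_lt xs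

theorem pairwise_gt_iff_canon_rev (xs : List Int) :
    xs.Pairwise (· > ·) ↔ xs = (PySem.List.sorted (PySem.Set.ofList xs) (fun x => x) false).reverse := by
  constructor
  · intro h
    have hnd : xs.Nodup := h.imp ne_of_gt
    rw [PySem.Set.ofList_eq_self_of_nodup xs hnd]
    have hrev : xs.reverse.Pairwise (· < ·) := by
      rw [List.pairwise_reverse]; exact h
    have hs := PySem.List.sorted_eq_of_perm_of_pairwise_lt xs xs.reverse (fun x => x)
      xs.reverse_perm hrev
    rw [hs, List.reverse_reverse]
  · intro h
    have hp := PySem.List.sorted_ofList_pairwise_lt xs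
    have : (PySem.List.sorted (PySem.Set.ofList xs) (fun x => x) false).reverse.Pairwise (· > ·) := by
      rw [List.pairwise_reverse]; exact hp
    rw [h]; exact this

-- ===== VERDICT (by name: the statement is the Claim_ definition above) =====
theorem get_value_trend_spec : Claim_equal_get_value_trend := by
  intro current history _
  unfold Spec_get_value_trend get_value_trend get_value_trend_alt
  by_cases h2 : history.length < 2
  · simp [h2]
  · simp only [h2, if_false]
    by_cases hinc : history.Pairwise (· < ·)
    · rw [if_pos ((adj_all_lt history).2 hinc), if_pos ((pairwise_lt_iff_canon history).1 hinc)]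
    · rw [if_neg (fun h => hinc ((adj_all_lt history).1 h)),
        if_neg (fun h => hinc ((pairwise_lt_iff_canon history).2 h))]
      by_cases hdec : history.Pairwise (· > ·)
      · rw [if_pos ((adj_all_gt history).2 hdec), if_pos ((pairwise_gt_iff_canon_rev history).1 hdec)]
      · rw [if_neg (fun h => hdec ((adj_all_gt history).1 h)),
          if_neg (fun h => hdec ((pairwise_gt_iff_canon_rev history).2 h))]
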